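-- pv_equiv track=rewrite | github.com/mikedasquirrel/namesake | analyzers/label_nominative_extractor.py | _count_consonant_clusters
-- ===== SOURCE A (Python) =====
-- def _count_consonant_clusters(text: str) -> int:
--     """Count consonant clusters (2+ consonants together)"""
--     vowels = set('aeiou')
--     clusters = 0
--     in_cluster = False
--     cluster_length = 0
--
--     for char in text.lower():
--         if char.isalpha():
--             if char not in vowels:
--                 cluster_length += 1
--                 if cluster_length >= 2:
--                     if not in_cluster:
--                         clusters += 1
--                         in_cluster = True
--             else:
--                 in_cluster = False
--                 cluster_length = 0
--
--     return clusters
-- ===== SOURCE B (Python) =====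
-- def _count_consonant_clusters(text: str) -> int:
--     """Count consonant clusters (2+ consonants together)"""
--     vowels = set('aeiou')
--     letters = [c for c in text.lower() if c.isalpha()]
--     cons = [c not in vowels for c in letters]
--     return sum(1 for prev, cur, nxt in zip([False] + cons, cons, cons[1:])
--                if cur and nxt and not prev)
-- ===== Notes on version B (the rewrite author's own statement) =====
-- stated objective: alternative
-- what changed: Replaces A's single-pass in_cluster/cluster_length state machine with a filter-then-windowed-scan: build the alphabetic-lowercase letter list, its consonant mask, and count positions where two consonants meet preceded by a non-consonant via zip over shifted copies of the mask.
import Mathlib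
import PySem

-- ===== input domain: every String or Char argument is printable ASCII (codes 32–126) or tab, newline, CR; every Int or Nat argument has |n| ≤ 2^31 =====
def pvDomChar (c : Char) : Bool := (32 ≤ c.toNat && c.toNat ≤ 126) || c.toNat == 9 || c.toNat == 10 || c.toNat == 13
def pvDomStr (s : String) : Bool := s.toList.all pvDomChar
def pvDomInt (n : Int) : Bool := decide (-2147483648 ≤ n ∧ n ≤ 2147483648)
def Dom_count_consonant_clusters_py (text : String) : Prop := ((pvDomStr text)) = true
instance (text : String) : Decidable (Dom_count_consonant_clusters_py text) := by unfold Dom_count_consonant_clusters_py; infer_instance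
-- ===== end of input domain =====

-- B replaces A's in_cluster/cluster_length state machine by a filter-then-windowed-scan
-- (count positions where two consonants meet and the previous letter is not a consonant): alternative decomposition, same cost.

-- ===== PORT A =====
-- the loop body of A, step for step (vowels = set('aeiou'); state = (clusters, in_cluster, cluster_length))
def pvStepA (s : Int × Bool × Int) (char : Char) : Int × Bool × Int :=
  if PySem.Chars.isalpha char then
    if !((PySem.Set.ofList ['a','e','i','o','u']).contains char) then
      let cluster_length := s.2.2 + 1
      if 2 ≤ cluster_length then
        if !s.2.1 then (s.1 + 1, true, cluster_length)
        else (s.1, s.2.1, cluster_length)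
      else (s.1, s.2.1, cluster_length)
    else (s.1, false, 0)
  else s

def count_consonant_clusters_py (text : String) : Int :=
  ((PySem.Chars.lower text.toList).foldl pvStepA (0, false, 0)).1

-- ===== PORT B =====
def count_consonant_clusters_py_alt (text : String) : Int :=
  let vowels : PySem.Set Char := PySem.Set.ofList ['a','e','i','o','u']
  let letters := (PySem.Chars.lower text.toList).filter (fun c => PySem.Chars.isalpha c)
  let cons := letters.map (fun c => !(vowels.contains c))
  (((false :: cons).zip (cons.zip cons.tail)).countP (fun t => t.2.1 && t.2.2 && !t.1) : Int)

-- ===== PRECONDITION & SPEC =====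
def Spec_count_consonant_clusters_py (text : String) (out : Int) : Prop := out = count_consonant_clusters_py_alt text
instance (text : String) (out : Int) : Decidable (Spec_count_consonant_clusters_py text out) := by unfold Spec_count_consonant_clusters_py; infer_instance

-- ===== CLAIM (what is proved, stated in full; the proofs are below) =====
def Claim_equal_count_consonant_clusters_py : Prop := ∀ (text : String), Dom_count_consonant_clusters_py text → Spec_count_consonant_clusters_py text (count_consonant_clusters_py text)

-- ===== LEMMAS AND PROOFS =====

-- "is a consonant" after A's two guards
def pvP (c : Char) : Bool := !((PySem.Set.ofList ['a','e','i','o','u']).contains c)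

-- the consonant mask of the alphabetic letters of l
def pvCons (l : List Char) : List Bool :=
  (l.filter (fun c => PySem.Chars.isalpha c)).map pvP

-- number of maximal runs of `true` of length ≥ 2, given whether the element before the list is `true`
def pvN (prev : Bool) : List Bool → Int
  | [] => 0
  | b :: t => (if b && (t.headD false) && !prev then 1 else 0) + pvN b t

-- B's zip/count computes pvN
lemma pv_zipcount (bs : List Bool) : ∀ (prev : Bool),
    ((((prev :: bs).zip (bs.zip bs.tail)).countP (fun t => t.2.1 && t.2.2 && !t.1) : Nat) : Int)
      = pvN prev bs := by
  induction bs with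
  | nil => intro prev; simp [pvN]
  | cons a t ih =>
    intro prev
    cases t with
    | nil => simp [pvN]
    | cons b t' =>
      have := ih a
      simp only [List.zip, List.tail_cons, List.zipWith_cons_cons, List.countP_cons] at this ⊢
      by_cases h : (a && b && !prev) = true
      · simp [pvN, h, this]; omega
      · simp [pvN, h, this]

-- A's fold computes pvN, for each of the three reachable state shapes
lemma pv_foldA (l : List Char) : ∀ (c len : Int),
    ((List.foldl pvStepA (c, false, (0:Int)) l).1 = c + pvN false (pvCons l))
    ∧ (1 ≤ len → (List.foldl pvStepA (c, false, len) l).1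
        = c + (if (pvCons l).headD false then 1 else 0) + pvN true (pvCons l))
    ∧ ((List.foldl pvStepA (c, true, len) l).1 = c + pvN true (pvCons l)) := by
  have hpv : ∀ ch, (!((PySem.Set.ofList ['a','e','i','o','u']).contains ch)) = pvP ch :=
    fun _ => rfl
  induction l with
  | nil => intro c len; simp [pvCons, pvN]
  | cons a t ih =>
    intro c len
    by_cases ha : PySem.Chars.isalpha a = true
    · by_cases hp : pvP a = true
      · have hcons : pvCons (a :: t) = true :: pvCons t := by
          simp only [pvCons, List.filter_cons, ha, if_pos, List.map_cons, hp]
        refine ⟨?_, ?_, ?_⟩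
        · show (List.foldl pvStepA (pvStepA (c, false, 0) a) t).1 = _
          have hstep : pvStepA (c, false, (0:Int)) a = (c, false, 1) := by
            simp only [pvStepA]; rw [hpv, hp]; simp [ha]
          rw [hstep, (ih c 1).2.1 (by norm_num), hcons]
          simp [pvN, add_assoc]
        · intro hlen
          show (List.foldl pvStepA (pvStepA (c, false, len) a) t).1 = _
          have hstep : pvStepA (c, false, len) a = (c + 1, true, len + 1) := by
            simp only [pvStepA]; rw [hpv, hp]
            simp [ha, show (2:Int) ≤ len + 1 from by omega]
          rw [hstep, (ih (c + 1) (len + 1)).2.2, hcons]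
          simp [pvN, add_assoc]
        · show (List.foldl pvStepA (pvStepA (c, true, len) a) t).1 = _
          have hstep : pvStepA (c, true, len) a = (c, true, len + 1) := by
            simp only [pvStepA]; rw [hpv, hp]
            simp [ha]
          rw [hstep, (ih c (len + 1)).2.2, hcons]
          simp [pvN]
      · have hcons : pvCons (a :: t) = false :: pvCons t := by
          simp only [pvCons, List.filter_cons, ha, if_pos, List.map_cons]
          simp only [Bool.not_eq_true] at hp
          simp [hp]
        have hstep : ∀ inC (len₀ : Int), pvStepA (c, inC, len₀) a = (c, false, 0) := by
          intro inC len₀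
          simp only [pvStepA]; rw [hpv]
          simp only [Bool.not_eq_true] at hp
          simp [ha, hp]
        refine ⟨?_, ?_, ?_⟩ <;> try intro hlen
        all_goals
          show (List.foldl pvStepA (pvStepA _ a) t).1 = _
          rw [hstep, (ih c 0).1, hcons]; simp [pvN]
    · have hcons : pvCons (a :: t) = pvCons t := by simp [pvCons, ha]
      have hstep : ∀ s, pvStepA s a = s := by intro s; simp [pvStepA, ha]
      refine ⟨?_, ?_, ?_⟩ <;> try intro hlen
      · show (List.foldl pvStepA (pvStepA _ a) t).1 = _
        rw [hstep, (ih c len).1, hcons]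
      · show (List.foldl pvStepA (pvStepA _ a) t).1 = _
        rw [hstep, (ih c len).2.1 hlen, hcons]
      · show (List.foldl pvStepA (pvStepA _ a) t).1 = _
        rw [hstep, (ih c len).2.2, hcons]

-- ===== VERDICT (by name: the statement is the Claim_ definition above) =====
theorem count_consonant_clusters_py_spec : Claim_equal_count_consonant_clusters_py := by
  intro text _
  show count_consonant_clusters_py text = count_consonant_clusters_py_alt text
  unfold count_consonant_clusters_py count_consonant_clusters_py_alt
  rw [(pv_foldA (PySem.Chars.lower text.toList) 0 0).1, zero_add,
    ← pv_zipcount (pvCons (PySem.Chars.lower text.toList)) false]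
  rfl
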